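-- pv_equiv track=rewrite | github.com/thoftheocean/ai-surgical | tools/email_inbox/email_inbox_reader_app.py | guess_imap_server
-- ===== SOURCE A (Python) =====
-- IMAP_PRESETS = {
--     "gmail.com": ("imap.gmail.com", 993),
--     "googlemail.com": ("imap.gmail.com", 993),
--     "outlook.com": ("outlook.office365.com", 993),
--     "hotmail.com": ("outlook.office365.com", 993),
--     "live.com": ("outlook.office365.com", 993),
--     "msn.com": ("outlook.office365.com", 993),
--     "office365.com": ("outlook.office365.com", 993),
--     "qq.com": ("imap.qq.com", 993),
--     "foxmail.com": ("imap.qq.com", 993),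
--     "163.com": ("imap.163.com", 993),
--     "126.com": ("imap.126.com", 993),
--     "yeah.net": ("imap.yeah.net", 993),
--     "sina.com": ("imap.sina.com", 993),
--     "sina.cn": ("imap.sina.cn", 993),
--     "sohu.com": ("imap.sohu.com", 993),
--     "yahoo.com": ("imap.mail.yahoo.com", 993),
--     "yahoo.cn": ("imap.mail.yahoo.com", 993),
--     "icloud.com": ("imap.mail.me.com", 993),
--     "me.com": ("imap.mail.me.com", 993),
--     "mail.com": ("imap.mail.com", 993),
--     "aol.com": ("imap.aol.com", 993),
--     "protonmail.com": ("127.0.0.1", 1143),  # Proton 需桥接，此处示意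
--     "yandex.com": ("imap.yandex.com", 993),
--     "zoho.com": ("imap.zoho.com", 993),
-- }
--
-- def _domain(addr: str) -> str | None:
--     """从邮箱地址提取域名，无效则返回 None"""
--     addr = (addr or "").strip().lower()
--     if "@" in addr:
--         return addr.split("@", 1)[1]
--     return None
--
-- def guess_imap_server(addr: str) -> tuple[str, int]:
--     """
--     根据邮箱地址推断 IMAP 服务器。
--     先在预设表中查找；若未匹配，则按域名自动生成 imap.{域名}，如 imap.retrorabbit.net。
--     """
--     domain = _domain(addr)
--     if domain:
--         for suffix, (host, port) in IMAP_PRESETS.items():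
--             if domain == suffix or domain.endswith("." + suffix):
--                 return host, port
--         return f"imap.{domain}", 993
--     return "imap.gmail.com", 993  # 无法解析域名时的默认
-- ===== SOURCE B (Python) =====
-- IMAP_HOSTS = {
--     "gmail.com": "imap.gmail.com",
--     "googlemail.com": "imap.gmail.com",
--     "outlook.com": "outlook.office365.com",
--     "hotmail.com": "outlook.office365.com",
--     "live.com": "outlook.office365.com",
--     "msn.com": "outlook.office365.com",
--     "office365.com": "outlook.office365.com",
--     "qq.com": "imap.qq.com",
--     "foxmail.com": "imap.qq.com",
--     "163.com": "imap.163.com",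
--     "126.com": "imap.126.com",
--     "yeah.net": "imap.yeah.net",
--     "sina.com": "imap.sina.com",
--     "sina.cn": "imap.sina.cn",
--     "sohu.com": "imap.sohu.com",
--     "yahoo.com": "imap.mail.yahoo.com",
--     "yahoo.cn": "imap.mail.yahoo.com",
--     "icloud.com": "imap.mail.me.com",
--     "me.com": "imap.mail.me.com",
--     "mail.com": "imap.mail.com",
--     "aol.com": "imap.aol.com",
--     "protonmail.com": "127.0.0.1",  # Proton bridge
--     "yandex.com": "imap.yandex.com",
--     "zoho.com": "imap.zoho.com",
-- }
--
--
-- def _domain(addr):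
--     addr = (addr or "").strip().lower()
--     if "@" in addr:
--         return addr.split("@", 1)[1]
--     return None
--
--
-- def guess_imap_server(addr):
--     # Every preset key has exactly two dot-separated labels, so the whole
--     # endswith scan collapses to ONE lookup of the domain's last-two-label
--     # suffix; the table stores only the host (port is 993 except Proton's
--     # local bridge).
--     domain = _domain(addr) or "gmail.com"
--     key = []
--     dots = 0
--     for ch in reversed(domain):
--         if ch == ".":
--             dots += 1
--             if dots == 2:
--                 break
--         key.append(ch)
--     host = IMAP_HOSTS.get("".join(reversed(key)), "imap." + domain)
--     return host, 1143 if host == "127.0.0.1" else 993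
-- ===== Notes on version B (the rewrite author's own statement) =====
-- stated objective: alternative
-- what changed: Replaces A's linear scan of all 24 presets with an endswith test per entry by a single direct lookup of the domain's last-two-label suffix (collected by one right-to-left scan of the domain) in a host-only table, deriving the port (993, or 1143 for Proton's local bridge) from the host; correct because every preset key has exactly two dot-separated labels.
import Mathlib
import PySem

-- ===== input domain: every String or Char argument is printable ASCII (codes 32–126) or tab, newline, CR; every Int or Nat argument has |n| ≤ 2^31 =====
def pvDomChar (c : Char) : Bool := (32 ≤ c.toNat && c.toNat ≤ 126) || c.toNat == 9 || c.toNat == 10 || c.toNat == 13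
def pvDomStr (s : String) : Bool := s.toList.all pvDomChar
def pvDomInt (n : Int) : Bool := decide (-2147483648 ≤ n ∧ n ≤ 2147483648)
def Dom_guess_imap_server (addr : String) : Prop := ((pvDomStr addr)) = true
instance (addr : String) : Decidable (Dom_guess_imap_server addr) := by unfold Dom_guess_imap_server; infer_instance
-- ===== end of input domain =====

-- B replaces A's linear endswith scan of the full preset table by ONE direct lookup of the
-- domain's last-two-label suffix in a host-only table (alternative algorithm, same results).

-- ===== PORT A =====
-- IMAP_PRESETS as an insertion-ordered association list (A scans its items with endswith)
def presets : List (List Char × (String × Int)) :=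
  [ ("gmail.com".toList, ("imap.gmail.com", 993)),
    ("googlemail.com".toList, ("imap.gmail.com", 993)),
    ("outlook.com".toList, ("outlook.office365.com", 993)),
    ("hotmail.com".toList, ("outlook.office365.com", 993)),
    ("live.com".toList, ("outlook.office365.com", 993)),
    ("msn.com".toList, ("outlook.office365.com", 993)),
    ("office365.com".toList, ("outlook.office365.com", 993)),
    ("qq.com".toList, ("imap.qq.com", 993)),
    ("foxmail.com".toList, ("imap.qq.com", 993)),
    ("163.com".toList, ("imap.163.com", 993)),
    ("126.com".toList, ("imap.126.com", 993)),
    ("yeah.net".toList, ("imap.yeah.net", 993)),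
    ("sina.com".toList, ("imap.sina.com", 993)),
    ("sina.cn".toList, ("imap.sina.cn", 993)),
    ("sohu.com".toList, ("imap.sohu.com", 993)),
    ("yahoo.com".toList, ("imap.mail.yahoo.com", 993)),
    ("yahoo.cn".toList, ("imap.mail.yahoo.com", 993)),
    ("icloud.com".toList, ("imap.mail.me.com", 993)),
    ("me.com".toList, ("imap.mail.me.com", 993)),
    ("mail.com".toList, ("imap.mail.com", 993)),
    ("aol.com".toList, ("imap.aol.com", 993)),
    ("protonmail.com".toList, ("127.0.0.1", 1143)),
    ("yandex.com".toList, ("imap.yandex.com", 993)),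
    ("zoho.com".toList, ("imap.zoho.com", 993)) ]

-- _domain helper (identical in both pythons): (addr or "").strip().lower(), then the part
-- after the first '@' if any ('addr.split("@", 1)[1]'), else None
def pyDomain (addr : String) : Option (List Char) :=
  let a := PySem.Chars.lower (PySem.Chars.strip (if addr.toList = [] then [] else addr.toList))
  if PySem.Chars.isIn ['@'] a = true then
    PySem.List.pyGet? ((PySem.Chars.splitMax? a ['@'] 1).getD []) 1
  else none

-- A's loop: first preset whose key equals the domain or is a '.'-boundary suffix of it
def scanA (d : List Char) : List (List Char × (String × Int)) → Option (String × Int)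
  | [] => none
  | (suffix, hostport) :: rest =>
      if d = suffix ∨ PySem.Chars.endswith d ('.' :: suffix) = true then some hostport
      else scanA d rest

def guess_imap_server (addr : String) : String × Int :=
  match pyDomain addr with
  | some d =>
      if d ≠ [] then
        match scanA d presets with
        | some hv => hv
        | none => (String.ofList ("imap.".toList ++ d), 993)
      else ("imap.gmail.com", 993)
  | none => ("imap.gmail.com", 993)

-- ===== PORT B =====
-- B's host-only table: every key has exactly two dot-separated labels; port is 993 except Proton's bridge
def hostPairs : List (String × String) :=
  [ ("gmail.com", "imap.gmail.com"),
    ("googlemail.com", "imap.gmail.com"),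
    ("outlook.com", "outlook.office365.com"),
    ("hotmail.com", "outlook.office365.com"),
    ("live.com", "outlook.office365.com"),
    ("msn.com", "outlook.office365.com"),
    ("office365.com", "outlook.office365.com"),
    ("qq.com", "imap.qq.com"),
    ("foxmail.com", "imap.qq.com"),
    ("163.com", "imap.163.com"),
    ("126.com", "imap.126.com"),
    ("yeah.net", "imap.yeah.net"),
    ("sina.com", "imap.sina.com"),
    ("sina.cn", "imap.sina.cn"),
    ("sohu.com", "imap.sohu.com"),
    ("yahoo.com", "imap.mail.yahoo.com"),
    ("yahoo.cn", "imap.mail.yahoo.com"),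
    ("icloud.com", "imap.mail.me.com"),
    ("me.com", "imap.mail.me.com"),
    ("mail.com", "imap.mail.com"),
    ("aol.com", "imap.aol.com"),
    ("protonmail.com", "127.0.0.1"),
    ("yandex.com", "imap.yandex.com"),
    ("zoho.com", "imap.zoho.com") ]

def hostTable : PySem.Dict String String := PySem.Dict.ofList hostPairs

-- B's right-to-left scan collecting the last-two-label suffix: walk the reversed domain,
-- keep characters, stop just before the second '.' (the python for/break loop, seen = dots==1)
def grab (seen : Bool) : List Char → List Char
  | [] => []
  | c :: cs => if c = '.' then (if seen then [] else '.' :: grab true cs) else c :: grab seen cs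

def guess_imap_server_alt (addr : String) : String × Int :=
  let dom0 := (pyDomain addr).getD []
  let dom := if dom0 = [] then "gmail.com".toList else dom0    -- domain = _domain(addr) or "gmail.com"
  let host := PySem.Dict.getD hostTable (String.ofList (grab false dom.reverse).reverse)
      (String.ofList ("imap.".toList ++ dom))
  (host, if host = "127.0.0.1" then 1143 else 993)

-- ===== PRECONDITION & SPEC =====
def Spec_guess_imap_server (addr : String) (out : String × Int) : Prop := out = guess_imap_server_alt addr
instance (addr : String) (out : String × Int) : Decidable (Spec_guess_imap_server addr out) := by unfold Spec_guess_imap_server; infer_instance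

-- ===== CLAIM (what is proved, stated in full; the proofs are below) =====
def Claim_equal_guess_imap_server : Prop := ∀ (addr : String), Dom_guess_imap_server addr → Spec_guess_imap_server addr (guess_imap_server addr)

-- ===== LEMMAS AND PROOFS =====

-- A's matching condition for one key
def Match (d k : List Char) : Prop := d = k ∨ ('.' :: k) <:+ d

-- B's key: the last-two-label suffix of d
def keyOf (d : List Char) : List Char := (grab false d.reverse).reverse

-- the two tables hold the same data
def withPort (kv : String × String) : List Char × (String × Int) :=
  (kv.1.toList, (kv.2, if kv.2 = "127.0.0.1" then 1143 else 993))

theorem tables_eq : presets = hostPairs.map withPort := by decide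

theorem hostTable_items : PySem.Dict.items hostTable = hostPairs := by decide

theorem presets_nodup : (presets.map Prod.fst).Nodup := by decide

theorem presets_keys_one_dot : ∀ p ∈ presets, p.1.count '.' = 1 := by decide

theorem beq_key (k : String) (cs : List Char) :
    (k.toList == cs) = (k == String.ofList cs) := by
  rw [Bool.eq_iff_iff]
  simp only [beq_iff_eq]
  constructor
  · intro h; rw [← h, String.ofList_toList]
  · intro h; rw [h, String.toList_ofList]

theorem find?_tables (t : List (String × String)) (cs : List Char) :
    (t.map withPort).find? (fun p => p.1 == cs)
      = Option.map withPort (t.find? (fun kv => kv.1 == String.ofList cs)) := by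
  induction t with
  | nil => rfl
  | cons kv rest ih =>
    obtain ⟨k, v⟩ := kv
    simp only [List.map_cons, List.find?_cons, withPort, beq_key]
    cases h : (k == String.ofList cs) with
    | true => simp [withPort]
    | false => simpa [h] using ih

theorem find?_of_mem {k : List Char} {vp : String × Int} (h : (k, vp) ∈ presets) :
    presets.find? (fun p => p.1 == k) = some (k, vp) := by
  have : ∀ ps : List (List Char × (String × Int)), (ps.map Prod.fst).Nodup →
      (k, vp) ∈ ps → ps.find? (fun p => p.1 == k) = some (k, vp) := by
    intro ps
    induction ps with
    | nil => intro _ h; exact absurd h List.not_mem_nil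
    | cons hd tl ih =>
      intro hnd hmem
      obtain ⟨k0, v0⟩ := hd
      simp only [List.map_cons, List.nodup_cons] at hnd
      rcases List.mem_cons.mp hmem with he | ht
      · injection he with h1 h2
        subst h1; subst h2
        rw [List.find?_cons_of_pos (by simp)]
      · have hk0 : k0 ≠ k := by
          intro he; subst he
          exact hnd.1 (List.mem_map.mpr ⟨(k0, vp), ht, rfl⟩)
        rw [List.find?_cons_of_neg (by simp [hk0])]
        exact ih hnd.2 ht
  exact this presets presets_nodup h

-- grab facts
theorem grab_dot_false (cs : List Char) : grab false ('.' :: cs) = '.' :: grab true cs := by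
  simp [grab]

theorem grab_dot_true (cs : List Char) : grab true ('.' :: cs) = [] := by
  simp [grab]

theorem grab_ne (s : Bool) {c : Char} (hc : c ≠ '.') (cs : List Char) :
    grab s (c :: cs) = c :: grab s cs := by
  simp [grab, hc]

theorem grab_count_zero (s : Bool) (l : List Char) (h : l.count '.' = 0) : grab s l = l := by
  induction l generalizing s with
  | nil => rfl
  | cons c cs ih =>
    by_cases hc : c = '.'
    · subst hc; rw [List.count_cons_self] at h; exact absurd h (by omega)
    · rw [List.count_cons_of_ne (a := '.') (b := c) hc] at h
      rw [grab_ne s hc, ih s h]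

theorem grab_true_stop (b y : List Char) (h : b.count '.' = 0) :
    grab true (b ++ '.' :: y) = b := by
  induction b with
  | nil => simpa using grab_dot_true y
  | cons c cs ih =>
    by_cases hc : c = '.'
    · subst hc; rw [List.count_cons_self] at h; exact absurd h (by omega)
    · rw [List.count_cons_of_ne (a := '.') (b := c) hc] at h
      rw [List.cons_append, grab_ne true hc, ih h]

theorem grab_false_le_one (l : List Char) (h : l.count '.' ≤ 1) : grab false l = l := by
  induction l with
  | nil => rfl
  | cons c cs ih =>
    by_cases hc : c = '.'
    · subst hc
      rw [List.count_cons_self] at h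
      rw [grab_dot_false, grab_count_zero true cs (by omega)]
    · rw [List.count_cons_of_ne (a := '.') (b := c) hc] at h
      rw [grab_ne false hc, ih h]

theorem grab_false_split (x y : List Char) (h : x.count '.' = 1) :
    grab false (x ++ '.' :: y) = x := by
  induction x with
  | nil => simp at h
  | cons c cs ih =>
    by_cases hc : c = '.'
    · subst hc
      rw [List.count_cons_self] at h
      rw [List.cons_append, grab_dot_false, grab_true_stop cs y (by omega)]
    · rw [List.count_cons_of_ne (a := '.') (b := c) hc] at h
      rw [List.cons_append, grab_ne false hc, ih h]

theorem grab_prefix_split (s : Bool) (l : List Char) :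
    grab s l = l ∨ ∃ y, l = grab s l ++ '.' :: y := by
  induction l generalizing s with
  | nil => exact Or.inl rfl
  | cons c cs ih =>
    by_cases hc : c = '.'
    · subst hc
      cases s with
      | true => exact Or.inr ⟨cs, by rw [grab_dot_true]; rfl⟩
      | false =>
        rcases ih true with h | ⟨y, hy⟩
        · exact Or.inl (by rw [grab_dot_false, h])
        · exact Or.inr ⟨y, by rw [grab_dot_false, List.cons_append, ← hy]⟩
    · rcases ih s with h | ⟨y, hy⟩
      · exact Or.inl (by rw [grab_ne s hc, h])
      · exact Or.inr ⟨y, by rw [grab_ne s hc, List.cons_append, ← hy]⟩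

theorem keyOf_match (d : List Char) : Match d (keyOf d) := by
  unfold Match keyOf
  rcases grab_prefix_split false d.reverse with h | ⟨y, hy⟩
  · exact Or.inl (by rw [h, List.reverse_reverse])
  · right
    refine ⟨y.reverse, ?_⟩
    have h2 := congrArg List.reverse hy
    simp only [List.reverse_reverse, List.reverse_append, List.reverse_cons,
      List.append_assoc, List.singleton_append] at h2
    exact h2.symm

theorem keyOf_eq_self {d : List Char} (h : d.count '.' ≤ 1) : keyOf d = d := by
  unfold keyOf
  rw [grab_false_le_one d.reverse (by rw [List.count_reverse]; exact h), List.reverse_reverse]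

theorem keyOf_suffix {k : List Char} (y : List Char) (hk : k.count '.' = 1) :
    keyOf (y ++ '.' :: k) = k := by
  unfold keyOf
  have hrev : (y ++ '.' :: k).reverse = k.reverse ++ '.' :: y.reverse := by
    simp [List.reverse_append]
  rw [hrev, grab_false_split k.reverse y.reverse (by rw [List.count_reverse]; exact hk),
    List.reverse_reverse]

theorem match_eq_keyOf {d k : List Char} (h : Match d k) (hc : k.count '.' = 1) :
    keyOf d = k := by
  rcases h with h | ⟨y, hy⟩
  · subst h; exact keyOf_eq_self (le_of_eq hc)
  · rw [← hy]; exact keyOf_suffix y hc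

-- A's scan, driven by the find? result for keyOf d
theorem scanA_some {d : List Char} {vp : String × Int}
    (hmem : (keyOf d, vp) ∈ presets) : scanA d presets = some vp := by
  have huniq : ∀ p ∈ presets, Match d p.1 → p = (keyOf d, vp) := by
    intro p hp hmp
    have h1 : p.1 = keyOf d := (match_eq_keyOf hmp (presets_keys_one_dot p hp)).symm
    have h2 : presets.find? (fun q => q.1 == p.1) = some (p.1, p.2) :=
      find?_of_mem (by rw [← Prod.mk.eta (p := p)] at hp; exact hp)
    rw [h1] at h2
    rw [find?_of_mem hmem] at h2
    injection h2 with h3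
    have h4 := (Prod.mk.injEq _ _ _ _).mp h3
    exact Prod.ext h1 h4.2.symm
  have : ∀ ps : List (List Char × (String × Int)), (keyOf d, vp) ∈ ps →
      (∀ p ∈ ps, Match d p.1 → p = (keyOf d, vp)) → scanA d ps = some vp := by
    intro ps
    induction ps with
    | nil => intro h; exact absurd h (List.not_mem_nil)
    | cons hd tl ih =>
      intro hmem hun
      obtain ⟨k0, v0⟩ := hd
      simp only [scanA]
      split
      · next hcond =>
        have hM0 : Match d k0 := by
          rcases hcond with h | h
          · exact Or.inl h
          · exact Or.inr ((PySem.Chars.endswith_iff _ _).mp h)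
        have := hun (k0, v0) List.mem_cons_self hM0
        simp only [Prod.mk.injEq] at this
        rw [this.2]
      · next hcond =>
        have hne : (k0, v0) ≠ (keyOf d, vp) := by
          intro he
          apply hcond
          injection he with h1 h2
          subst h1
          rcases keyOf_match d with h | h
          · exact Or.inl h
          · exact Or.inr ((PySem.Chars.endswith_iff _ _).mpr h)
        apply ih
        · rcases List.mem_cons.mp hmem with h | h
          · exact absurd h.symm hne
          · exact h
        · exact fun p hp => hun p (List.mem_cons_of_mem _ hp)
  exact this presets hmem huniq

theorem scanA_none {d : List Char}
    (hl : ∀ vp, (keyOf d, vp) ∉ presets) : scanA d presets = none := by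
  have hno : ∀ p ∈ presets, ¬ Match d p.1 := by
    intro p hp hm
    have h1 : p.1 = keyOf d := (match_eq_keyOf hm (presets_keys_one_dot p hp)).symm
    exact hl p.2 (by rw [← h1, Prod.mk.eta]; exact hp)
  have : ∀ ps : List (List Char × (String × Int)),
      (∀ p ∈ ps, ¬ Match d p.1) → scanA d ps = none := by
    intro ps
    induction ps with
    | nil => intro _; rfl
    | cons hd tl ih =>
      intro h
      obtain ⟨k0, v0⟩ := hd
      simp only [scanA]
      split
      · next hcond =>
        exfalso
        apply h (k0, v0) List.mem_cons_self
        rcases hcond with hc | hc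
        · exact Or.inl hc
        · exact Or.inr ((PySem.Chars.endswith_iff _ _).mp hc)
      · exact ih fun p hp => h p (List.mem_cons_of_mem _ hp)
  exact this presets hno

theorem fallback_ne (d : List Char) :
    ¬ String.ofList ("imap.".toList ++ d) = "127.0.0.1" := by
  intro h
  have := congrArg String.toList h
  rw [String.toList_ofList] at this
  simp at this

theorem core (d : List Char) :
    (match scanA d presets with
      | some hv => hv
      | none => (String.ofList ("imap.".toList ++ d), 993))
    = (let host := PySem.Dict.getD hostTable (String.ofList (grab false d.reverse).reverse)
          (String.ofList ("imap.".toList ++ d));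
        (host, if host = "127.0.0.1" then 1143 else 993)) := by
  have hkey : (grab false d.reverse).reverse = keyOf d := rfl
  have hget : PySem.Dict.get? hostTable (String.ofList (keyOf d))
      = Option.map (fun kv => kv.2) (hostPairs.find? (fun kv => kv.1 == String.ofList (keyOf d))) := by
    simp [PySem.Dict.get?, hostTable_items]
  have hpre : presets.find? (fun p => p.1 == keyOf d)
      = Option.map withPort (hostPairs.find? (fun kv => kv.1 == String.ofList (keyOf d))) := by
    rw [tables_eq]; exact find?_tables hostPairs (keyOf d)
  cases hf : hostPairs.find? (fun kv => kv.1 == String.ofList (keyOf d)) with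
  | some kv =>
    obtain ⟨hk, hv⟩ := kv
    have hk1 : hk = String.ofList (keyOf d) := by
      have := List.find?_some hf
      simpa using this
    have hmem : (keyOf d, (hv, if hv = "127.0.0.1" then (1143 : Int) else 993)) ∈ presets := by
      have hmem0 := List.mem_of_find?_eq_some (by rw [hpre, hf]; rfl : presets.find? (fun p => p.1 == keyOf d) = some (withPort (hk, hv)))
      have : withPort (hk, hv) = (keyOf d, (hv, if hv = "127.0.0.1" then (1143 : Int) else 993)) := by
        unfold withPort
        rw [hk1, String.toList_ofList]
      rwa [this] at hmem0
    rw [scanA_some hmem]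
    simp only [hkey, PySem.Dict.getD, hget, hf, Option.map_some, Option.getD_some]
  | none =>
    have hnone : ∀ vp, (keyOf d, vp) ∉ presets := by
      intro vp hmem
      have := find?_of_mem hmem
      rw [hpre, hf] at this
      exact absurd this (by simp)
    rw [scanA_none hnone]
    simp only [hkey, PySem.Dict.getD, hget, hf, Option.map_none, Option.getD_none]
    rw [if_neg (fallback_ne d)]

-- ===== VERDICT (by name: the statement is the Claim_ definition above) =====
theorem guess_imap_server_spec : Claim_equal_guess_imap_server := by
  intro addr _
  unfold Spec_guess_imap_server guess_imap_server guess_imap_server_alt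
  cases h : pyDomain addr with
  | none => decide
  | some d =>
    by_cases hd : d = []
    · subst hd; decide
    · simp only [ne_eq, hd, not_false_eq_true, if_pos, Option.getD_some]
      exact core d
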